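-- pv_equiv track=rewrite | github.com/Mfoley5454/JoeBot | modelMaker.py | createBigrams
-- ===== SOURCE A (Python) =====
-- def createBigrams(dataString):
--     unigramData = dataString.split()
--     bigramList = []
--     isFirstWord = True
--     firstWord = unigramData[0]
--     prev = ""
--     for word in unigramData:
--         if ((word == firstWord) and (isFirstWord == True)):
--             isFirstWord = False
--             prev = word
--         else:
--             bigram = [prev, word]
--             bigramList.append(bigram)
--             prev = word
--     return bigramList
-- ===== SOURCE B (Python) =====
-- def createBigrams(dataString):
--     words = dataString.split()
--     return [[a, b] for a, b in zip(words, words[1:])]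
-- ===== Notes on version B (the rewrite author's own statement) =====
-- stated objective: idiomatic
-- what changed: B pairs the word list with its own offset tail via zip in one comprehension instead of threading a running prev and a first-word flag through an explicit loop with append.
import Mathlib
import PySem

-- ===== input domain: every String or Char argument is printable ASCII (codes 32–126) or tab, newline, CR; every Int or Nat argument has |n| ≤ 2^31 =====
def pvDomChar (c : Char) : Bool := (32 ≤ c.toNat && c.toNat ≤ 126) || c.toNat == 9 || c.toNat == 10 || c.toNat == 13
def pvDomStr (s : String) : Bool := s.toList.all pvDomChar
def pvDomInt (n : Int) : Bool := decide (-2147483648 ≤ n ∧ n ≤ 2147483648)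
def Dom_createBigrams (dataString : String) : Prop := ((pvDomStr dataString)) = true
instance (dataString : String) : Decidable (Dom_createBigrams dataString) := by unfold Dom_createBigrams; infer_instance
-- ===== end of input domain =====

-- B replaces A's prev/first-word state machine by zipping the word list with its tail (idiomatic; same cost).


-- ===== PORT A =====
-- A's loop body: state = (isFirstWord, prev, bigramList)
def createBigramsStep (firstWord : String) (st : Bool × String × List (List String))
    (word : String) : Bool × String × List (List String) :=
  if word == firstWord && st.1 then (false, word, st.2.2)
  else (st.1, word, st.2.2 ++ [[st.2.1, word]])

def createBigrams (dataString : String) : List (List String) :=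
  let unigramData := PySem.Str.split₀ dataString
  match PySem.List.pyGet? unigramData 0 with
  | none => []  -- Python raises IndexError here; excluded by Pre_createBigrams
  | some firstWord =>
    (unigramData.foldl (createBigramsStep firstWord) (true, "", [])).2.2

-- ===== PORT B =====
def createBigrams_alt (dataString : String) : List (List String) :=
  let words := PySem.Str.split₀ dataString
  (words.zip (PySem.List.slice words (some 1) none)).map (fun p => [p.1, p.2])

-- ===== PRECONDITION & SPEC =====
-- Pre_ excludes exactly the inputs with no words, where A raises IndexError.
def Pre_createBigrams (dataString : String) : Prop := PySem.Str.split₀ dataString ≠ []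
instance (dataString : String) : Decidable (Pre_createBigrams dataString) := by unfold Pre_createBigrams; infer_instance
def pvWitness_createBigrams : String := "a b"

def Spec_createBigrams (dataString : String) (out : List (List String)) : Prop := out = createBigrams_alt dataString
instance (dataString : String) (out : List (List String)) : Decidable (Spec_createBigrams dataString out) := by unfold Spec_createBigrams; infer_instance

-- ===== CLAIM (what is proved, stated in full; the proofs are below) =====
def Claim_equal_createBigrams : Prop := ∀ (dataString : String), Dom_createBigrams dataString → Pre_createBigrams dataString → Spec_createBigrams dataString (createBigrams dataString)

-- ===== LEMMAS AND PROOFS =====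

-- Once isFirstWord is false, A's loop just appends adjacent pairs: exactly zip (prev :: l) l.
theorem createBigramsStep_foldl_false (w0 : String) (l : List String) :
    ∀ (prev : String) (acc : List (List String)),
    (l.foldl (createBigramsStep w0) (false, prev, acc)).2.2 =
      acc ++ ((prev :: l).zip l).map (fun p => [p.1, p.2]) := by
  induction l with
  | nil => intro prev acc; simp
  | cons w l ih =>
    intro prev acc
    have hstep : createBigramsStep w0 (false, prev, acc) w = (false, w, acc ++ [[prev, w]]) := by
      simp [createBigramsStep]
    simp only [List.foldl_cons, hstep, ih]
    simp

-- ===== VERDICT (by name: the statement is the Claim_ definition above) =====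
theorem createBigrams_spec : Claim_equal_createBigrams := by
  intro s _ hpre
  unfold Spec_createBigrams createBigrams createBigrams_alt
  unfold Pre_createBigrams at hpre
  cases hws : PySem.Str.split₀ s with
  | nil => exact absurd hws hpre
  | cons w0 rest =>
    have h0 : PySem.List.pyGet? (w0 :: rest) (0 : Int) = some w0 := by
      simp [PySem.List.pyGet?, PySem.List.pyIdx?]
    simp only [h0]
    have hfirst : createBigramsStep w0 (true, "", []) w0 = (false, w0, []) := by
      simp [createBigramsStep]
    simp only [List.foldl_cons, hfirst, createBigramsStep_foldl_false]
    rw [PySem.List.slice_from_one]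
    simp
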